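-- pv_equiv track=rewrite | github.com/Kimhyeonsuk/Programmers_Python | python_Algorithm/Level2/EnglishConnect.py | solution
-- ===== SOURCE A (Python) =====
-- def solution(n, words):
--     answer = [0,0]
--     calllist=set()
--     tmpword=words[0]
--     calllist.add(tmpword)
--     for idx,word in enumerate(words):
--         if idx==0:continue
--         if word in calllist or tmpword[-1]!=word[0]:
--             answer[1]=int(idx/n)+1
--             answer[0]=1+(idx%n)
--             break
--         tmpword=word
--         calllist.add(word)
--     return answer
-- ===== SOURCE B (Python) =====
-- def solution(n, words):
--     # pass 1: first index whose word already appeared among the earlier words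
--     seen = set()
--     dup_idx = len(words)
--     for i, w in enumerate(words):
--         if w in seen:
--             dup_idx = i
--             break
--         seen.add(w)
--     # pass 2: first chain break strictly before the duplicate (later ones cannot win)
--     idx = dup_idx
--     for i in range(1, dup_idx):
--         if words[i - 1][-1] != words[i][0]:
--             idx = i
--             break
--     if not words or idx == len(words):
--         return [0, 0]
--     return [1 + (idx % n), int(idx / n) + 1]
-- ===== Notes on version B (the rewrite author's own statement) =====
-- stated objective: alternative
-- what changed: A's single stateful scan (running set + previous word, break at first violation) is replaced by two independent passes - the first-duplicate index, then the first chain-break index strictly before it - combined at the end.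
import Mathlib
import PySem

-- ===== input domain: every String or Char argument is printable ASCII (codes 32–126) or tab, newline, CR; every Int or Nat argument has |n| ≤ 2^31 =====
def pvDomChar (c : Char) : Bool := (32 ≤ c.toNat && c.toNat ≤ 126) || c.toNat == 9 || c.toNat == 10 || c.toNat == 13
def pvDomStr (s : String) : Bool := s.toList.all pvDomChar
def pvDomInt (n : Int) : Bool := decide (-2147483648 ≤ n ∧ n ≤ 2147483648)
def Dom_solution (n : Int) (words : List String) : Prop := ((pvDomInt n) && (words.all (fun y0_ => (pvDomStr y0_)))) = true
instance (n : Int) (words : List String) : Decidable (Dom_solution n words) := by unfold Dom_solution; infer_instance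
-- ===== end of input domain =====

-- B replaces A's single stateful scan (running set + previous word, break at first violation) by two
-- independent passes — first-duplicate index, then first chain break strictly before it — equal cost.
-- int(idx/n) is ported as truncating division Int.tdiv (exact for the index/divisor magnitudes of this task).

-- ===== PORT A =====
def solutionGo (n : Int) (tmpword : String) (calllist : PySem.Set String) :
    List (Int × String) → List Int
  | [] => [0, 0]
  | (idx, word) :: rest =>
    if idx = 0 then solutionGo n tmpword calllist rest
    else if PySem.Set.contains calllist word
            || decide (PySem.Str.pyGet? tmpword (-1) ≠ PySem.Str.pyGet? word 0) then
      -- break: answer[1] = int(idx/n)+1, answer[0] = 1+(idx%n); returns [answer[0], answer[1]]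
      [1 + PySem.Int.mod idx n, Int.tdiv idx n + 1]
    else solutionGo n word (PySem.Set.add calllist word) rest

def solution (n : Int) (words : List String) : List Int :=
  match PySem.List.pyGet? words 0 with
  | none => []   -- IndexError on words[0] (excluded by Pre_)
  | some tmpword =>
      solutionGo n tmpword (PySem.Set.add PySem.Set.empty tmpword) (PySem.List.enumerate words 0)

-- ===== PORT B =====
-- pass 1 of Source B: first index whose word already appeared (none = search exhausted)
def dupGo (seen : PySem.Set String) : List (Int × String) → Option Int
  | [] => none
  | (i, w) :: rest =>
    if PySem.Set.contains seen w then some i else dupGo (PySem.Set.add seen w) rest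

-- pass 2 of Source B: first chain break in the given index range
def chainGo (ws : List String) : List Int → Option Int
  | [] => none
  | i :: rest =>
    if decide ((PySem.List.pyGet? ws (i - 1)).bind (fun w => PySem.Str.pyGet? w (-1))
               ≠ (PySem.List.pyGet? ws i).bind (fun w => PySem.Str.pyGet? w 0)) then some i
    else chainGo ws rest

def solution_alt (n : Int) (words : List String) : List Int :=
  let dupIdx := (dupGo PySem.Set.empty (PySem.List.enumerate words 0)).getD (words.length : Int)
  let idx := (chainGo words (PySem.List.pyRange 1 dupIdx 1)).getD dupIdx
  if words = [] ∨ idx = (words.length : Int) then [0, 0]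
  else [1 + PySem.Int.mod idx n, Int.tdiv idx n + 1]

-- ===== PRECONDITION & SPEC =====
-- last letter / first letter of ws[j], as the ports compute them
def lastC (ws : List String) (j : Nat) : Option Char :=
  (ws[j]?).bind (fun w => PySem.Str.pyGet? w (-1))
def headC (ws : List String) (j : Nat) : Option Char :=
  (ws[j]?).bind (fun w => PySem.Str.pyGet? w 0)
-- violation predicates at index k (k ≥ 1 where used)
def dupB (ws : List String) (k : Nat) : Bool :=
  PySem.Set.contains (PySem.Set.ofList (ws.take k)) (ws.getD k "")
def chB (ws : List String) (k : Nat) : Bool := decide (lastC ws (k - 1) ≠ headC ws k)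
def vio (ws : List String) (k : Nat) : Bool := dupB ws k || chB ws k

-- Pre_ excludes exactly the inputs where A raises: the empty list (IndexError at words[0]);
-- inputs whose first violation index touches an empty-string word without being a duplicate
-- (IndexError on ''[−1] / ''[0]); and n = 0 when some violation exists (ZeroDivisionError).
def Pre_solution (n : Int) (words : List String) : Prop :=
  words ≠ []
    ∧ (∀ i, i < words.length →
        (1 ≤ i ∧ (∀ j, j < i → 1 ≤ j → vio words j = false) ∧ dupB words i = false) →
        words.getD (i - 1) "" ≠ "" ∧ words.getD i "" ≠ "")
    ∧ (n = 0 → ∀ i, i < words.length → 1 ≤ i → vio words i = false)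
instance (n : Int) (words : List String) : Decidable (Pre_solution n words) := by
  unfold Pre_solution; infer_instance

def pvWitness_solution : Int × List String := (2, ["ab", "ba", "ac"])

def Spec_solution (n : Int) (words : List String) (out : List Int) : Prop := out = solution_alt n words
instance (n : Int) (words : List String) (out : List Int) : Decidable (Spec_solution n words out) := by unfold Spec_solution; infer_instance

-- ===== CLAIM (what is proved, stated in full; the proofs are below) =====
def Claim_equal_solution : Prop := ∀ (n : Int) (words : List String), Dom_solution n words → Pre_solution n words → Spec_solution n words (solution n words)
-- ===== LEMMAS AND PROOFS =====

def ansOf (n : Int) (i : Int) : List Int := [1 + PySem.Int.mod i n, Int.tdiv i n + 1]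

theorem getElem?_of_drop_cons {ws l : List String} {w : String} {k : Nat}
    (h : ws.drop k = w :: l) : ws[k]? = some w := by
  have h0 : (ws.drop k)[0]? = ws[k + 0]? := List.getElem?_drop
  rw [h] at h0
  simpa using h0.symm

theorem take_succ_of_drop_cons {ws l : List String} {w : String} {k : Nat}
    (h : ws.drop k = w :: l) : ws.take (k + 1) = ws.take k ++ [w] := by
  rw [List.take_add_one, getElem?_of_drop_cons h]
  rfl

theorem drop_succ_of_drop_cons {ws l : List String} {w : String} {k : Nat}
    (h : ws.drop k = w :: l) : ws.drop (k + 1) = l := by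
  rw [← List.drop_drop, h]
  rfl

theorem lt_length_of_drop_cons {ws l : List String} {w : String} {k : Nat}
    (h : ws.drop k = w :: l) : k < ws.length := by
  by_contra hge
  rw [List.drop_eq_nil_of_le (by omega)] at h
  simp at h

theorem getD_of_drop_cons {ws l : List String} {w : String} {k : Nat}
    (h : ws.drop k = w :: l) : ws.getD k "" = w := by
  rw [List.getD_eq_getElem?_getD, getElem?_of_drop_cons h]
  rfl

theorem lastC_eq {ws : List String} {j : Nat} (hj : j < ws.length) :
    lastC ws j = PySem.Str.pyGet? (ws.getD j "") (-1) := by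
  rw [lastC, List.getElem?_eq_getElem hj, List.getD_eq_getElem?_getD, List.getElem?_eq_getElem hj]
  rfl

theorem headC_of_drop_cons {ws l : List String} {w : String} {k : Nat}
    (h : ws.drop k = w :: l) : headC ws k = PySem.Str.pyGet? w 0 := by
  rw [headC, getElem?_of_drop_cons h]
  rfl

-- the break condition tested by A's loop at position k is `vio ws k`
theorem cond_eq_vio {ws l : List String} {w : String} {k : Nat} (hk : 1 ≤ k)
    (h : ws.drop k = w :: l) :
    (PySem.Set.contains (PySem.Set.ofList (ws.take k)) w
      || decide (PySem.Str.pyGet? (ws.getD (k - 1) "") (-1) ≠ PySem.Str.pyGet? w 0))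
      = vio ws k := by
  have hklen : k < ws.length := lt_length_of_drop_cons h
  rw [vio, dupB, chB, getD_of_drop_cons h, lastC_eq (by omega), headC_of_drop_cons h]

-- characterization of A's loop
theorem go_char (n : Int) (ws : List String) :
    ∀ (l : List String) (k : Nat), 1 ≤ k → ws.drop k = l →
      solutionGo n (ws.getD (k - 1) "") (PySem.Set.ofList (ws.take k))
          (PySem.List.enumerate l (k : Int))
        = match (List.range' k l.length).find? (vio ws) with
          | none => [0, 0]
          | some i => ansOf n (i : Int) := by
  intro l
  induction l with
  | nil => intro k _ _; rfl
  | cons w l ih =>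
    intro k hk hdrop
    rw [PySem.List.enumerate_cons, solutionGo]
    rw [if_neg (show ¬((k : Int) = 0) by omega)]
    rw [cond_eq_vio hk hdrop]
    rw [List.length_cons, List.range'_succ]
    by_cases hv : vio ws k = true
    · rw [if_pos hv, List.find?_cons_of_pos hv]
      rfl
    · rw [if_neg (by simp [hv]), List.find?_cons_of_neg (by simp [hv])]
      have hset : PySem.Set.add (PySem.Set.ofList (ws.take k)) w
          = PySem.Set.ofList (ws.take (k + 1)) := by
        rw [take_succ_of_drop_cons hdrop, PySem.Set.ofList_append_singleton]
      have hw : w = ws.getD (k + 1 - 1) "" := by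
        rw [Nat.add_sub_cancel, getD_of_drop_cons hdrop]
      have hcast : (k : Int) + 1 = ((k + 1 : Nat) : Int) := by omega
      rw [hset, hcast]
      calc solutionGo n w (PySem.Set.ofList (ws.take (k + 1)))
              (PySem.List.enumerate l ((k + 1 : Nat) : Int))
          = solutionGo n (ws.getD (k + 1 - 1) "") (PySem.Set.ofList (ws.take (k + 1)))
              (PySem.List.enumerate l ((k + 1 : Nat) : Int)) := by rw [← hw]
        _ = _ := ih (k + 1) (by omega) (drop_succ_of_drop_cons hdrop)

theorem solution_eq (n : Int) (w0 : String) (rest : List String) :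
    solution n (w0 :: rest)
      = match (List.range' 1 rest.length).find? (vio (w0 :: rest)) with
        | none => [0, 0]
        | some i => ansOf n (i : Int) := by
  rw [solution]
  simp only [PySem.List.pyGet?_zero_cons]
  rw [PySem.List.enumerate_cons, solutionGo, if_pos rfl]
  have h1 : PySem.Set.add PySem.Set.empty w0 = PySem.Set.ofList (List.take 1 (w0 :: rest)) := rfl
  have h3 : (0 : Int) + 1 = ((1 : Nat) : Int) := by omega
  rw [h1, h3]
  calc solutionGo n w0 (PySem.Set.ofList (List.take 1 (w0 :: rest)))
          (PySem.List.enumerate rest ((1 : Nat) : Int))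
      = solutionGo n ((w0 :: rest).getD (1 - 1) "") (PySem.Set.ofList (List.take 1 (w0 :: rest)))
          (PySem.List.enumerate rest ((1 : Nat) : Int)) := rfl
    _ = _ := go_char n (w0 :: rest) rest 1 (by omega) rfl

-- characterization of B's duplicate pass
theorem dup_char (ws : List String) :
    ∀ (l : List String) (k : Nat), ws.drop k = l →
      dupGo (PySem.Set.ofList (ws.take k)) (PySem.List.enumerate l (k : Int))
        = ((List.range' k l.length).find? (dupB ws)).map (fun i : Nat => (i : Int)) := by
  intro l
  induction l with
  | nil => intro k _; rfl
  | cons w l ih =>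
    intro k hdrop
    rw [PySem.List.enumerate_cons, dupGo]
    have hc : PySem.Set.contains (PySem.Set.ofList (ws.take k)) w = dupB ws k := by
      rw [dupB, getD_of_drop_cons hdrop]
    rw [hc, List.length_cons, List.range'_succ]
    by_cases hv : dupB ws k = true
    · rw [if_pos hv, List.find?_cons_of_pos hv]
      rfl
    · rw [if_neg (by simp [hv]), List.find?_cons_of_neg (by simp [hv])]
      have hset : PySem.Set.add (PySem.Set.ofList (ws.take k)) w
          = PySem.Set.ofList (ws.take (k + 1)) := by
        rw [take_succ_of_drop_cons hdrop, PySem.Set.ofList_append_singleton]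
      have hcast : (k : Int) + 1 = ((k + 1 : Nat) : Int) := by omega
      rw [hset, hcast]
      exact ih (k + 1) (drop_succ_of_drop_cons hdrop)

-- characterization of B's chain pass
theorem chain_char (ws : List String) :
    ∀ (l : List Nat), (∀ j ∈ l, 1 ≤ j) →
      chainGo ws (l.map (fun j : Nat => (j : Int)))
        = (l.find? (chB ws)).map (fun j : Nat => (j : Int)) := by
  intro l
  induction l with
  | nil => intro _; rfl
  | cons j l ih =>
    intro hall
    have hj : 1 ≤ j := hall j (List.mem_cons_self)
    rw [List.map_cons, chainGo]
    have hc : (decide ((PySem.List.pyGet? ws ((j : Int) - 1)).bind (fun w => PySem.Str.pyGet? w (-1))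
        ≠ (PySem.List.pyGet? ws (j : Int)).bind (fun w => PySem.Str.pyGet? w 0)))
        = chB ws j := by
      rw [chB, lastC, headC, show ((j : Int) - 1) = ((j - 1 : Nat) : Int) by omega,
        PySem.List.pyGet?_natCast, PySem.List.pyGet?_natCast]
    rw [hc]
    by_cases hv : chB ws j = true
    · rw [if_pos hv, List.find?_cons_of_pos hv]
      rfl
    · rw [if_neg (by simp [hv]), List.find?_cons_of_neg (by simp [hv])]
      exact ih (fun x hx => hall x (List.mem_cons_of_mem _ hx))

theorem pyRange_eq_map_range' (m : Nat) :
    PySem.List.pyRange 1 ((m + 1 : Nat) : Int) 1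
      = (List.range' 1 m).map (fun j : Nat => (j : Int)) := by
  rw [PySem.List.pyRange_one, List.range'_eq_map_range]
  have ht : (((m + 1 : Nat) : Int) - 1).toNat = m := by omega
  rw [ht, List.map_map]
  apply List.map_congr_left
  intro k _
  simp

-- find? over range' s m, characterized
theorem find?_range'_some_iff (p : Nat → Bool) :
    ∀ (m s i : Nat), (List.range' s m).find? p = some i ↔
      (s ≤ i ∧ i < s + m ∧ p i = true ∧ ∀ j, s ≤ j → j < i → p j = false) := by
  intro m
  induction m with
  | zero =>
    intro s i
    rw [show List.range' s 0 = [] from rfl]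
    simp only [List.find?_nil]
    constructor
    · intro h; cases h
    · rintro ⟨h1, h2, -⟩; omega
  | succ m ih =>
    intro s i
    rw [List.range'_succ]
    by_cases hs : p s = true
    · rw [List.find?_cons_of_pos hs]
      constructor
      · intro h
        injection h with h
        subst h
        exact ⟨le_refl _, by omega, hs, fun j hj1 hj2 => absurd hj1 (by omega)⟩
      · rintro ⟨h1, h2, h3, h4⟩
        have hi : i = s := by
          by_contra hne
          have := h4 s (le_refl _) (by omega)
          rw [hs] at this
          exact absurd this (by simp)
        rw [hi]
    · rw [List.find?_cons_of_neg (by simp [hs])]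
      rw [ih (s + 1) i]
      have hps : p s = false := by
        cases h : p s
        · rfl
        · exact absurd h hs
      constructor
      · rintro ⟨h1, h2, h3, h4⟩
        refine ⟨by omega, by omega, h3, ?_⟩
        intro j hj1 hj2
        rcases Nat.eq_or_lt_of_le hj1 with he | hl
        · rw [← he]; exact hps
        · exact h4 j hl hj2
      · rintro ⟨h1, h2, h3, h4⟩
        have hne : i ≠ s := by
          intro he
          rw [he, hps] at h3
          exact absurd h3 (by simp)
        exact ⟨by omega, by omega, h3, fun j hj1 hj2 => h4 j (by omega) hj2⟩

theorem solution_alt_eq (n : Int) (w0 : String) (rest : List String) :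
    solution_alt n (w0 :: rest)
      = match (List.range' 1 rest.length).find? (vio (w0 :: rest)) with
        | none => [0, 0]
        | some i => ansOf n (i : Int) := by
  have hdup : dupGo PySem.Set.empty (PySem.List.enumerate (w0 :: rest) 0)
      = ((List.range' 1 rest.length).find? (dupB (w0 :: rest))).map (fun j : Nat => (j : Int)) := by
    have h := dup_char (w0 :: rest) (w0 :: rest) 0 rfl
    rw [show (((0 : Nat)) : Int) = (0 : Int) from rfl] at h
    rw [show PySem.Set.ofList (List.take 0 (w0 :: rest)) = PySem.Set.empty from rfl] at h
    rw [h, List.length_cons, List.range'_succ,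
      List.find?_cons_of_neg (show ¬dupB (w0 :: rest) 0 = true by
        rw [dupB]; simp [PySem.Set.ofList, PySem.Set.contains]),
      Nat.zero_add]
  have hlen : ((w0 :: rest).length : Int) = ((rest.length + 1 : Nat) : Int) := by
    rw [List.length_cons]
  simp only [solution_alt, hdup, hlen]
  cases hd : (List.range' 1 rest.length).find? (dupB (w0 :: rest)) with
  | none =>
    simp only [Option.map_none, Option.getD_none]
    rw [pyRange_eq_map_range' rest.length,
      chain_char (w0 :: rest) (List.range' 1 rest.length)
        (fun j hj => (List.mem_range'_1.1 hj).1)]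
    have hdall : ∀ j, 1 ≤ j → j < 1 + rest.length → dupB (w0 :: rest) j = false := by
      intro j h1 h2
      have := List.find?_eq_none.1 hd j (List.mem_range'_1.2 ⟨h1, by omega⟩)
      cases h : dupB (w0 :: rest) j
      · rfl
      · exact absurd h this
    cases hc : (List.range' 1 rest.length).find? (chB (w0 :: rest)) with
    | none =>
      have hvio : (List.range' 1 rest.length).find? (vio (w0 :: rest)) = none := by
        apply List.find?_eq_none.2
        intro j hj
        obtain ⟨h1, h2⟩ := List.mem_range'_1.1 hj
        have hcj := List.find?_eq_none.1 hc j hj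
        have hcj' : chB (w0 :: rest) j = false := by
          cases h : chB (w0 :: rest) j
          · rfl
          · exact absurd h hcj
        simp [vio, hdall j h1 h2, hcj']
      rw [hvio]
      simp
    | some c =>
      obtain ⟨h1, h2, h3, h4⟩ := (find?_range'_some_iff _ _ _ _).1 hc
      have hvio : (List.range' 1 rest.length).find? (vio (w0 :: rest)) = some c := by
        apply (find?_range'_some_iff _ _ _ _).2
        refine ⟨h1, h2, by simp [vio, h3], ?_⟩
        intro j hj1 hj2
        simp [vio, hdall j hj1 (by omega), h4 j hj1 hj2]
      rw [hvio]
      have hne : ¬(w0 :: rest = [] ∨ ((c : Nat) : Int) = ((rest.length + 1 : Nat) : Int)) := by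
        rintro (h | h)
        · cases h
        · omega
      simp only [Option.map_some, Option.getD_some]
      rw [if_neg hne]
      rfl
  | some d =>
    obtain ⟨hd1, hd2, hd3, hd4⟩ := (find?_range'_some_iff _ _ _ _).1 hd
    simp only [Option.map_some, Option.getD_some]
    have hdr : PySem.List.pyRange 1 ((d : Nat) : Int) 1
        = (List.range' 1 (d - 1)).map (fun j : Nat => (j : Int)) := by
      rw [show ((d : Nat) : Int) = ((d - 1 + 1 : Nat) : Int) by omega]
      exact pyRange_eq_map_range' (d - 1)
    rw [hdr, chain_char (w0 :: rest) (List.range' 1 (d - 1))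
        (fun j hj => (List.mem_range'_1.1 hj).1)]
    cases hc : (List.range' 1 (d - 1)).find? (chB (w0 :: rest)) with
    | none =>
      simp only [Option.map_none, Option.getD_none]
      have hvio : (List.range' 1 rest.length).find? (vio (w0 :: rest)) = some d := by
        apply (find?_range'_some_iff _ _ _ _).2
        refine ⟨hd1, hd2, by simp [vio, hd3], ?_⟩
        intro j hj1 hj2
        have hcj := List.find?_eq_none.1 hc j (List.mem_range'_1.2 ⟨hj1, by omega⟩)
        have hcj' : chB (w0 :: rest) j = false := by
          cases h : chB (w0 :: rest) j
          · rfl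
          · exact absurd h hcj
        simp [vio, hd4 j hj1 hj2, hcj']
      rw [hvio]
      have hne : ¬(w0 :: rest = [] ∨ ((d : Nat) : Int) = ((rest.length + 1 : Nat) : Int)) := by
        rintro (h | h)
        · cases h
        · omega
      rw [if_neg hne]
      rfl
    | some c =>
      obtain ⟨hc1, hc2, hc3, hc4⟩ := (find?_range'_some_iff _ _ _ _).1 hc
      simp only [Option.map_some, Option.getD_some]
      have hvio : (List.range' 1 rest.length).find? (vio (w0 :: rest)) = some c := by
        apply (find?_range'_some_iff _ _ _ _).2
        refine ⟨hc1, by omega, by simp [vio, hc3], ?_⟩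
        intro j hj1 hj2
        simp [vio, hd4 j hj1 (by omega), hc4 j hj1 hj2]
      rw [hvio]
      have hne : ¬(w0 :: rest = [] ∨ ((c : Nat) : Int) = ((rest.length + 1 : Nat) : Int)) := by
        rintro (h | h)
        · cases h
        · omega
      rw [if_neg hne]
      rfl

-- ===== VERDICT (by name: the statement is the Claim_ definition above) =====
theorem solution_spec : Claim_equal_solution := by
  intro n words _ hpre
  unfold Spec_solution
  obtain ⟨hne, -, -⟩ := hpre
  cases words with
  | nil => exact absurd rfl hne
  | cons w0 rest => rw [solution_eq, solution_alt_eq]
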